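-- pv_equiv track=rewrite | github.com/YinHeaven/Pekemon-multilinear-regression-efficiency-table | pokemonRLAI.py | update_type_suggestions
-- ===== SOURCE A (Python) =====
-- MAX_SUGGESTIONS = 15 # Aumentar el límite para mostrar más Pokémon por tipo
--
-- def update_type_suggestions(search_text, valid_types):
--     """
--     Genera y devuelve una lista de sugerencias de tipos válidos basada en el texto de búsqueda.
--     """
--     search_text_lower = search_text.lower()
--     if search_text_lower:
--         # Buscar tipos que empiecen con el texto de búsqueda
--         suggestions = [type_name for type_name in valid_types if type_name.startswith(search_text_lower)]
--         suggestions.sort() # Ordenar alfabéticamente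
--         return suggestions[:MAX_SUGGESTIONS] # Limitar el número de sugerencias
--     else:
--         return [] # No mostrar sugerencias si la caja está vacía
-- ===== SOURCE B (Python) =====
-- MAX_SUGGESTIONS = 15
--
-- def update_type_suggestions(search_text, valid_types):
--     prefix = search_text.lower()
--     if not prefix:
--         return []
--     matches = [t for t in valid_types if t.startswith(prefix)]
--     out = []
--     for _ in range(MAX_SUGGESTIONS):
--         if not matches:
--             break
--         m = min(matches)
--         matches.remove(m)
--         out.append(m)
--     return out
-- ===== Notes on version B (the rewrite author's own statement) =====
-- stated objective: alternative
-- what changed: Instead of sorting all prefix matches and slicing the first 15, B selects the minimum 15 times (min + remove), never sorting the whole list.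
import Mathlib
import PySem

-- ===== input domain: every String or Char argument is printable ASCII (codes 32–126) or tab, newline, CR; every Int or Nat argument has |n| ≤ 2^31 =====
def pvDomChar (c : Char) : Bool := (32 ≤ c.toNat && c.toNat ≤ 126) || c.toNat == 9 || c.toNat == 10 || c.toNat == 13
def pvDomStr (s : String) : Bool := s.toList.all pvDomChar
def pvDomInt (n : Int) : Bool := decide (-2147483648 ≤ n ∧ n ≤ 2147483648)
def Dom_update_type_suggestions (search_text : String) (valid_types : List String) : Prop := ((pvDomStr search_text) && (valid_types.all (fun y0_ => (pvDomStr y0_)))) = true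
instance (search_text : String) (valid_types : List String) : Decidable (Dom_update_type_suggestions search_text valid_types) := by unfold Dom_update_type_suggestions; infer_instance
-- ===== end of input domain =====

-- B replaces sort-then-slice by selecting the minimum up to 15 times (min + remove): an alternative selection algorithm, same result.
-- ===== PORT A =====
def update_type_suggestions (search_text : String) (valid_types : List String) : List String :=
  let search_text_lower := PySem.Str.lower search_text
  if search_text_lower = "" then
    []
  else
    -- suggestions = filter, then .sort(), then [:MAX_SUGGESTIONS]
    PySem.List.slice
      (PySem.List.sorted
        (valid_types.filter (fun type_name => PySem.Str.startswith type_name search_text_lower))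
        (fun x => x) false)
      none (some 15)

-- ===== PORT B =====
-- the 'for _ in range(15): if not ms: break; m = min(ms); ms.remove(m); out.append(m)' loop
def selectMins : Nat → List String → List String
  | 0, _ => []
  | fuel + 1, ms =>
    match PySem.List.min? ms (fun x => x) with
    | none => []   -- ms is empty: break
    | some m =>
      match PySem.List.remove? ms m with
      | none => [] -- unreachable: m ∈ ms
      | some rest => m :: selectMins fuel rest

def update_type_suggestions_alt (search_text : String) (valid_types : List String) : List String :=
  let pref := PySem.Str.lower search_text
  if pref = "" then
    []
  else
    selectMins 15 (valid_types.filter (fun t => PySem.Str.startswith t pref))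

-- ===== PRECONDITION & SPEC =====
def Spec_update_type_suggestions (search_text : String) (valid_types : List String) (out : List String) : Prop := out = update_type_suggestions_alt search_text valid_types
instance (search_text : String) (valid_types : List String) (out : List String) : Decidable (Spec_update_type_suggestions search_text valid_types out) := by unfold Spec_update_type_suggestions; infer_instance

-- ===== CLAIM (what is proved, stated in full; the proofs are below) =====
def Claim_equal_update_type_suggestions : Prop := ∀ (search_text : String) (valid_types : List String), Dom_update_type_suggestions search_text valid_types → Spec_update_type_suggestions search_text valid_types (update_type_suggestions search_text valid_types)

-- ===== LEMMAS AND PROOFS =====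

-- ===== VERDICT (by name: the statement is the Claim_ definition above) =====
lemma selectMins_eq_take_sorted : ∀ (k : Nat) (xs : List String),
    selectMins k xs = (PySem.List.sorted xs (fun x => x) false).take k := by
  intro k
  induction k with
  | zero => intro xs; simp [selectMins]
  | succ n ih =>
    intro xs
    cases hmin : PySem.List.min? xs (fun x => x) with
    | none =>
      have hx : xs = [] := (PySem.List.min?_eq_none_iff _ _).mp hmin
      subst hx; simp [selectMins, hmin, PySem.List.sorted_eq_nil_iff]
    | some m =>
      have hm : m ∈ xs := PySem.List.min?_mem hmin
      have hrem := PySem.List.remove?_eq_some_erase xs m hm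
      have hsorted : PySem.List.sorted xs (fun x => x) false
          = m :: PySem.List.sorted (xs.erase m) (fun x => x) false := by
        apply PySem.List.sorted_id_eq_of_perm_of_pairwise xs
        · exact ((PySem.List.sorted_perm _ _ _).cons m).trans (List.perm_cons_erase hm).symm
        · refine List.Pairwise.cons ?_ (PySem.List.sorted_pairwise _ _)
          intro y hy
          exact PySem.List.min?_isMin hmin y
            (List.mem_of_mem_erase ((PySem.List.mem_sorted _ _ _ _).mp hy))
      simp [selectMins, hmin, hrem, hsorted, ih]

theorem update_type_suggestions_spec : Claim_equal_update_type_suggestions := by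
  intro search_text valid_types _
  unfold Spec_update_type_suggestions update_type_suggestions update_type_suggestions_alt
  by_cases h : PySem.Str.lower search_text = ""
  · simp [h]
  · simp only [h, if_false]
    rw [selectMins_eq_take_sorted,
      PySem.List.slice_to _ (by norm_num : (0:Int) ≤ 15)]
    rfl
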